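-- pv_equiv track=rewrite | github.com/EdwardPROM/First_repo | Module 5/task5.py | get_phone_numbers_for_countries
-- ===== SOURCE A (Python) =====
-- def sanitize_phone_number(phone):
--     new_phone = (
--         phone.strip()
--         .removeprefix("+")
--         .replace("(", "")
--         .replace(")", "")
--         .replace("-", "")
--         .replace(" ", "")
--     )
--     return new_phone
--
-- def get_phone_numbers_for_countries(list_phones):
--     v_p = {'UA': [], 'JP': [], 'TW': [], 'SG': []}
--
--     for num in list_phones:
--         sort_num = sanitize_phone_number(num)
--         matched = False  # Define matched here
--
--         if sort_num.startswith('81'):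
--             v_p['JP'].append(sort_num)
--             matched = True
--         elif sort_num.startswith('65'):
--             v_p['SG'].append(sort_num)
--             matched = True
--         elif sort_num.startswith('886'):
--             v_p['TW'].append(sort_num)
--             matched = True
--         elif sort_num.startswith('380'):
--             v_p['UA'].append(sort_num)
--             matched = True
--
--         if not matched:
--             v_p['UA'].append(sort_num)  # Add to 'UA' if not matched
--
--     return v_p
-- ===== SOURCE B (Python) =====
-- # Staged re-implementation: sanitize every number once (translate with a deletion
-- # table), then build the result as a group-by — one filter pass per country over
-- # the sanitized list — instead of A's single pass that mutates dict buckets with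
-- # a matched flag ('380' collapses into the UA default).
-- _DEL = str.maketrans('', '', '()- ')
--
-- def _country(s):
--     if s.startswith('81'):
--         return 'JP'
--     if s.startswith('65'):
--         return 'SG'
--     if s.startswith('886'):
--         return 'TW'
--     return 'UA'
--
-- def get_phone_numbers_for_countries(list_phones):
--     nums = [p.strip().removeprefix('+').translate(_DEL) for p in list_phones]
--     return {c: [s for s in nums if _country(s) == c] for c in ('UA', 'JP', 'TW', 'SG')}
-- ===== Notes on version B (the rewrite author's own statement) =====
-- stated objective: alternative
-- what changed: Instead of one pass that mutates four dict buckets with a matched flag and chained str.replace calls, B sanitizes all numbers in a first pass (translate deletion table) and then builds the dict by a group-by comprehension, one filter pass per country over the sanitized list; the '380' branch disappears into the UA default.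
import Mathlib
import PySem

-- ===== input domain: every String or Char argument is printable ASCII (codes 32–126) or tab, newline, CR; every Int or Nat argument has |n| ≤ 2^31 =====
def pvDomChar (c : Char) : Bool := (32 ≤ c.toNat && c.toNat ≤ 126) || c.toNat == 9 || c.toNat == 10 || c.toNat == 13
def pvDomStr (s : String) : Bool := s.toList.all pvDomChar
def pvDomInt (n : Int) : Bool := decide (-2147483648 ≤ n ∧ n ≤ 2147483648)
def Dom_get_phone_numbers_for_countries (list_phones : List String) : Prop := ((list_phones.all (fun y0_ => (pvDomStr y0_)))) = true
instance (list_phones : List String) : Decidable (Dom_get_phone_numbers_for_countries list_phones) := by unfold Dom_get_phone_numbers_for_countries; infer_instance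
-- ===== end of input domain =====

-- B is a staged re-implementation (alternative, same cost): sanitize all numbers first,
-- then build the dict as a group-by, one filter pass per country.


-- ===== PORT A =====
-- removeprefix("+") has no PySem primitive: ported by hand as 'if startswith "+" then s[1:] else s' (exact: removeprefix drops one leading occurrence).
def sanitize_phone_number (phone : String) : String :=
  let s := PySem.Str.strip phone
  let s := if PySem.Str.startswith s "+" then PySem.Str.slice s (some 1) none else s
  PySem.Str.replace (PySem.Str.replace (PySem.Str.replace (PySem.Str.replace s "(" "") ")" "") "-" "") " " ""

-- A's loop body, named (a literal transcription of the for-body: matched flag and all)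
def pvStepA (v_p : PySem.Dict String (List String)) (num : String) : PySem.Dict String (List String) :=
  let sort_num := sanitize_phone_number num
  -- matched = False; the if/elif chain sets it
  let res : PySem.Dict String (List String) × Bool :=
    if PySem.Str.startswith sort_num "81" then (v_p.modify "JP" [] (· ++ [sort_num]), true)
    else if PySem.Str.startswith sort_num "65" then (v_p.modify "SG" [] (· ++ [sort_num]), true)
    else if PySem.Str.startswith sort_num "886" then (v_p.modify "TW" [] (· ++ [sort_num]), true)
    else if PySem.Str.startswith sort_num "380" then (v_p.modify "UA" [] (· ++ [sort_num]), true)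
    else (v_p, false)
  if !res.2 then res.1.modify "UA" [] (· ++ [sort_num]) else res.1

def get_phone_numbers_for_countries (list_phones : List String) : List (String × List String) :=
  (list_phones.foldl pvStepA
    (PySem.Dict.ofList [("UA", []), ("JP", []), ("TW", []), ("SG", [])])).items

-- ===== PORT B =====
-- removeprefix('+') and translate(deletion table) ported by hand: drop one leading '+',
-- filter out the deleted characters — both exact for these ASCII characters.
def pvClean (phone : String) : String :=
  let s := PySem.Str.strip phone
  let s := if PySem.Str.startswith s "+" then PySem.Str.slice s (some 1) none else s
  String.ofList (s.toList.filter (fun c => !decide (c ∈ ['(', ')', '-', ' '])))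

def pvCountry (s : String) : String :=
  if PySem.Str.startswith s "81" then "JP"
  else if PySem.Str.startswith s "65" then "SG"
  else if PySem.Str.startswith s "886" then "TW"
  else "UA"

def get_phone_numbers_for_countries_alt (list_phones : List String) : List (String × List String) :=
  let nums := list_phones.map pvClean
  ["UA", "JP", "TW", "SG"].map (fun c => (c, nums.filter (fun s => pvCountry s == c)))

-- ===== PRECONDITION & SPEC =====
def Spec_get_phone_numbers_for_countries (list_phones : List String) (out : List (String × List String)) : Prop := out = get_phone_numbers_for_countries_alt list_phones
instance (list_phones : List String) (out : List (String × List String)) : Decidable (Spec_get_phone_numbers_for_countries list_phones out) := by unfold Spec_get_phone_numbers_for_countries; infer_instance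

-- ===== CLAIM (what is proved, stated in full; the proofs are below) =====
def Claim_equal_get_phone_numbers_for_countries : Prop := ∀ (list_phones : List String), Dom_get_phone_numbers_for_countries list_phones → Spec_get_phone_numbers_for_countries list_phones (get_phone_numbers_for_countries list_phones)

-- ===== LEMMAS AND PROOFS =====

-- replace by the empty string on a single-char pattern is a character filter
lemma replace_go_filter (c : Char) (l acc : List Char) (fuel : Nat) (h : l.length ≤ fuel) :
    PySem.Chars.replace.go [c] [] fuel l acc = acc.reverse ++ l.filter (fun x => x != c) := by
  induction l generalizing fuel acc with
  | nil => cases fuel <;> simp [PySem.Chars.replace.go]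
  | cons c' t ih =>
    cases fuel with
    | zero => simp at h
    | succ fuel =>
      simp only [PySem.Chars.replace.go, List.isPrefixOf]
      by_cases hc : c = c'
      · subst hc
        simp only [BEq.rfl, Bool.and_true]
        rw [if_pos (by simp)]
        simp only [List.length_cons, List.length_nil, Nat.zero_add, List.drop_succ_cons,
          List.drop_zero, List.reverse_nil, List.nil_append]
        rw [ih acc fuel (by simpa using Nat.le_of_succ_le_succ h)]
        simp
      · rw [if_neg (by simp [hc]), ih (c' :: acc) fuel (by simpa using Nat.le_of_succ_le_succ h)]
        rw [List.filter_cons_of_pos (by simp [Ne.symm hc])]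
        simp

lemma replace_single_empty (cs : List Char) (c : Char) :
    PySem.Chars.replace cs [c] [] = cs.filter (fun x => x != c) := by
  simp [PySem.Chars.replace]
  exact replace_go_filter c cs [] cs.length le_rfl

lemma str_replace_char (s pat : String) (c : Char) (hp : pat.toList = [c]) :
    (PySem.Str.replace s pat "").toList = s.toList.filter (fun x => x != c) := by
  simp only [PySem.Str.toList_replace, hp, String.toList_empty]
  exact replace_single_empty s.toList c

-- the two sanitize pipelines agree
lemma sanitize_eq_clean (p : String) : sanitize_phone_number p = pvClean p := by
  unfold sanitize_phone_number pvClean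
  apply String.toList_inj.mp
  generalize (if PySem.Str.startswith (PySem.Str.strip p) "+" = true
      then PySem.Str.slice (PySem.Str.strip p) (some 1) none else PySem.Str.strip p) = t
  rw [str_replace_char _ _ ' ' (by decide)]
  rw [str_replace_char _ _ '-' (by decide)]
  rw [str_replace_char _ _ ')' (by decide)]
  rw [str_replace_char _ _ '(' (by decide)]
  rw [String.toList_ofList]
  simp only [List.filter_filter]
  apply List.filter_congr
  intro c _
  rcases Decidable.em (c = '(') with h | h <;> rcases Decidable.em (c = ')') with h2 | h2 <;>
    rcases Decidable.em (c = '-') with h3 | h3 <;> rcases Decidable.em (c = ' ') with h4 | h4 <;>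
    simp [h, h2, h3, h4]

lemma ofList_quad (ua jp tw sg : List String) :
    PySem.Dict.ofList [("UA", ua), ("JP", jp), ("TW", tw), ("SG", sg)]
      = PySem.Dict.mk [("UA", ua), ("JP", jp), ("TW", tw), ("SG", sg)] := by
  simp [PySem.Dict.ofList, PySem.Dict.update, PySem.Dict.empty, PySem.Dict.insert,
    PySem.Dict.contains]

lemma modify_quad (ua jp tw sg : List String) (k : String) (x : String)
    (h : k = "UA" ∨ k = "JP" ∨ k = "TW" ∨ k = "SG") :
    (PySem.Dict.mk [("UA", ua), ("JP", jp), ("TW", tw), ("SG", sg)]).modify k [] (· ++ [x])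
      = PySem.Dict.mk [("UA", if k = "UA" then ua ++ [x] else ua),
          ("JP", if k = "JP" then jp ++ [x] else jp),
          ("TW", if k = "TW" then tw ++ [x] else tw),
          ("SG", if k = "SG" then sg ++ [x] else sg)] := by
  rcases h with h | h | h | h <;> subst h <;>
    simp [PySem.Dict.modify, PySem.Dict.insert, PySem.Dict.getD, PySem.Dict.get?]

lemma pvCountry_cases (s : String) :
    pvCountry s = "JP" ∨ pvCountry s = "SG" ∨ pvCountry s = "TW" ∨ pvCountry s = "UA" := by
  unfold pvCountry; split_ifs <;> simp

-- one A-step on the 4-bucket dict appends the number to B's country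
lemma step_quad (ua jp tw sg : List String) (num : String) :
    pvStepA (PySem.Dict.mk [("UA", ua), ("JP", jp), ("TW", tw), ("SG", sg)]) num
      = PySem.Dict.mk
          [("UA", if pvCountry (pvClean num) = "UA" then ua ++ [pvClean num] else ua),
           ("JP", if pvCountry (pvClean num) = "JP" then jp ++ [pvClean num] else jp),
           ("TW", if pvCountry (pvClean num) = "TW" then tw ++ [pvClean num] else tw),
           ("SG", if pvCountry (pvClean num) = "SG" then sg ++ [pvClean num] else sg)] := by
  unfold pvStepA
  rw [sanitize_eq_clean]
  have e81 : ("81" : String).toList = ['8', '1'] := rfl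
  have e65 : ("65" : String).toList = ['6', '5'] := rfl
  have e886 : ("886" : String).toList = ['8', '8', '6'] := rfl
  by_cases h81 : PySem.Str.startswith (pvClean num) "81" = true
  · simp only [h81, if_true, Bool.not_true, Bool.false_eq_true, if_false]
    rw [modify_quad _ _ _ _ "JP" _ (by simp)]
    simp only [PySem.Str.startswith_eq, e81] at h81
    simp [pvCountry, h81]
  · by_cases h65 : PySem.Str.startswith (pvClean num) "65" = true
    · simp only [h81, h65, if_true, if_false, Bool.not_true, Bool.false_eq_true]
      rw [modify_quad _ _ _ _ "SG" _ (by simp)]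
      simp only [PySem.Str.startswith_eq, e81, e65] at h81 h65
      simp [pvCountry, h81, h65]
    · by_cases h886 : PySem.Str.startswith (pvClean num) "886" = true
      · simp only [h81, h65, h886, if_true, if_false, Bool.not_true, Bool.false_eq_true]
        rw [modify_quad _ _ _ _ "TW" _ (by simp)]
        simp only [PySem.Str.startswith_eq, e81, e65, e886] at h81 h65 h886
        simp [pvCountry, h81, h65, h886]
      · by_cases h380 : PySem.Str.startswith (pvClean num) "380" = true
        · simp only [h81, h65, h886, h380, if_true, if_false, Bool.not_true, Bool.false_eq_true]
          rw [modify_quad _ _ _ _ "UA" _ (by simp)]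
          simp only [PySem.Str.startswith_eq, e81, e65, e886] at h81 h65 h886
          simp [pvCountry, h81, h65, h886]
        · simp only [h81, h65, h886, h380]
          simp only [PySem.Str.startswith_eq, e81, e65, e886] at h81 h65 h886
          simp [pvCountry, h81, h65, h886, PySem.Dict.modify, PySem.Dict.insert,
            PySem.Dict.getD, PySem.Dict.get?]

-- loop invariant: A's fold over the 4-bucket dict appends exactly B's per-country filters
lemma loop_items (l : List String) : ∀ (ua jp tw sg : List String),
    (l.foldl pvStepA (PySem.Dict.mk [("UA", ua), ("JP", jp), ("TW", tw), ("SG", sg)])).items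
    = [("UA", ua ++ (l.map pvClean).filter (fun s => pvCountry s == "UA")),
       ("JP", jp ++ (l.map pvClean).filter (fun s => pvCountry s == "JP")),
       ("TW", tw ++ (l.map pvClean).filter (fun s => pvCountry s == "TW")),
       ("SG", sg ++ (l.map pvClean).filter (fun s => pvCountry s == "SG"))] := by
  induction l with
  | nil => intro ua jp tw sg; simp
  | cons num t ih =>
    intro ua jp tw sg
    rw [List.foldl_cons, step_quad, ih]
    simp only [List.map_cons, List.filter_cons]
    rcases pvCountry_cases (pvClean num) with h | h | h | h <;> rw [h] <;> simp

-- ===== VERDICT (by name: the statement is the Claim_ definition above) =====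
theorem get_phone_numbers_for_countries_spec : Claim_equal_get_phone_numbers_for_countries := by
  intro list_phones _
  unfold Spec_get_phone_numbers_for_countries
  unfold get_phone_numbers_for_countries get_phone_numbers_for_countries_alt
  rw [ofList_quad, loop_items]
  simp
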